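-- pv_equiv track=rewrite | github.com/MrBrantCode/unitest_baseline | mut_generate/mist_train_taco/taco_7409/solution.py | check_good_set
-- ===== SOURCE A (Python) =====
-- def check_good_set(words):
--     trie = dict()
--     for cstr in words:
--         curr = trie
--         for ch in cstr:
--             if ch not in curr:
--                 curr[ch] = dict()
--             curr = curr[ch]
--             if '_end' in curr:
--                 return "BAD SET", cstr
--         if len(curr) > 0:
--             return "BAD SET", cstr
--         curr['_end'] = ''
--     return "GOOD SET", ""
-- ===== SOURCE B (Python) =====
-- def check_good_set(words):
--     seen = set()
--     for cstr in words:
--         bad = False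
--         for i in range(1, len(cstr) + 1):
--             if cstr[:i] in seen:
--                 bad = True
--         if not bad:
--             for w in seen:
--                 if w.startswith(cstr):
--                     bad = True
--         if bad:
--             return "BAD SET", cstr
--         seen.add(cstr)
--     return "GOOD SET", ""
-- ===== Notes on version B (the rewrite author's own statement) =====
-- stated objective: simpler
-- what changed: Replaces the mutable nested-dict trie (character-by-character descent with node creation) by a flat set of previously seen words, testing each new word's non-empty prefixes against the set and whether any seen word starts with the new word.
import Mathlib
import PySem

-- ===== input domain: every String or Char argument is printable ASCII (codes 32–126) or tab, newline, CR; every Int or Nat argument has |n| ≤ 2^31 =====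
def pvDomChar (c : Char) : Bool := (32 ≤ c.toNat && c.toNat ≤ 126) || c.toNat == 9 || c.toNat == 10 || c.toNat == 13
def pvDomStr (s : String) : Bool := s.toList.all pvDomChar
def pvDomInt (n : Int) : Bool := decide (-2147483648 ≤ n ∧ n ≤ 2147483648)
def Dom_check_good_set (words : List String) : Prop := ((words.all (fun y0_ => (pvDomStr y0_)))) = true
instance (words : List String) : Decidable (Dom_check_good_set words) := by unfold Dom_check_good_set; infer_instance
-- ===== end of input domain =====

-- B replaces A's mutable nested-dict trie by a flat set of seen words with direct prefix tests (simpler; return value only — A never observably mutates its argument).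

-- ===== PORT A =====
-- A's trie: a nested dict whose keys are single-char strings plus the marker key "_end".
-- (mutual pair instead of a nested inductive, as required; PKids is the dict's entry list in insertion order)
mutual
inductive PTrie where
  | node : PKids → PTrie
inductive PKids where
  | nil : PKids
  | cons : String → PTrie → PKids → PKids
end

-- dict lookup (first match) on a trie node's entries
def kidsFind : PKids → String → Option PTrie
  | PKids.nil, _ => none
  | PKids.cons k v rest, key => if k = key then some v else kidsFind rest key

-- 'curr[key] = v': overwrite in place, else append (dict insertion order)
def kidsSet : PKids → String → PTrie → PKids
  | PKids.nil, key, v => PKids.cons key v PKids.nil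
  | PKids.cons k w rest, key, v =>
      if k = key then PKids.cons k v rest else PKids.cons k w (kidsSet rest key v)

-- len(curr)
def kidsLen : PKids → Nat
  | PKids.nil => 0
  | PKids.cons _ _ rest => kidsLen rest + 1

-- the inner 'for ch in cstr' loop of A, as a functional update of the trie:
-- 'none' = the loop (or the final 'len(curr) > 0' check) returned "BAD SET";
-- 'some t'' = the trie after this word was inserted (the in-place mutation, rebuilt along the path)
def insertWord : PTrie → List Char → Option PTrie
  | PTrie.node kids, [] =>
      if kidsLen kids > 0 then none
      else some (PTrie.node (kidsSet kids "_end" (PTrie.node PKids.nil)))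
  | PTrie.node kids, c :: rest =>
      let key := String.ofList [c]
      let kids1 := match kidsFind kids key with
        | some _ => kids
        | none => kidsSet kids key (PTrie.node PKids.nil)
      match kidsFind kids1 key with
      | none => none  -- unreachable: key was just ensured present
      | some child =>
        match child with
        | PTrie.node ckids =>
          if (kidsFind ckids "_end").isSome then none
          else match insertWord child rest with
            | none => none
            | some child' => some (PTrie.node (kidsSet kids1 key child'))

def aLoop : PTrie → List String → String × String
  | _, [] => ("GOOD SET", "")
  | t, w :: ws =>
    match insertWord t w.toList with
    | none => ("BAD SET", w)
    | some t' => aLoop t' ws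

def check_good_set (words : List String) : String × String :=
  aLoop (PTrie.node PKids.nil) words

-- ===== PORT B =====
-- bad flag for one word: a non-empty prefix of cstr is in seen, or some seen word starts with cstr
def badWord (seen : PySem.Set String) (cstr : String) : Bool :=
  ((PySem.List.pyRange 1 ((PySem.Str.len cstr) + 1) 1).any fun i =>
      PySem.Set.contains seen (PySem.Str.slice cstr none (some i)))
  || seen.any (fun w => PySem.Str.startswith w cstr)

def bLoop (seen : PySem.Set String) : List String → String × String
  | [] => ("GOOD SET", "")
  | cstr :: rest =>
      if badWord seen cstr then ("BAD SET", cstr)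
      else bLoop (PySem.Set.add seen cstr) rest

def check_good_set_alt (words : List String) : String × String :=
  bLoop PySem.Set.empty words

-- ===== PRECONDITION & SPEC =====
def Spec_check_good_set (words : List String) (out : String × String) : Prop := out = check_good_set_alt words
instance (words : List String) (out : String × String) : Decidable (Spec_check_good_set words out) := by unfold Spec_check_good_set; infer_instance

-- ===== CLAIM (what is proved, stated in full; the proofs are below) =====
def Claim_equal_check_good_set : Prop := ∀ (words : List String), Dom_check_good_set words → Spec_check_good_set words (check_good_set words)

-- ===== LEMMAS AND PROOFS =====

-- read-only walk along a list of chars in the trie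
def walk : PTrie → List Char → Option PTrie
  | t, [] => some t
  | PTrie.node kids, c :: cs =>
    match kidsFind kids (String.ofList [c]) with
    | none => none
    | some u => walk u cs

-- node at cs exists and carries the end marker
def endAt (t : PTrie) (cs : List Char) : Bool :=
  match walk t cs with
  | some (PTrie.node kids) => (kidsFind kids "_end").isSome
  | none => false

-- node at cs exists and is a non-empty dict
def fullAt (t : PTrie) (cs : List Char) : Bool :=
  match walk t cs with
  | some (PTrie.node kids) => decide (0 < kidsLen kids)
  | none => false

lemma keyNe (c : Char) : String.ofList [c] ≠ "_end" := by
  intro h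
  have h2 : (String.ofList [c]).toList.length = ("_end" : String).toList.length := by rw [h]
  simp [String.toList_ofList] at h2

lemma keyInj {c c' : Char} (h : String.ofList [c] = String.ofList [c']) : c = c' := by
  have h2 := congrArg String.toList h
  simp [String.toList_ofList] at h2
  exact h2

lemma find_set_self : ∀ (ks : PKids) (k : String) (v : PTrie),
    kidsFind (kidsSet ks k v) k = some v
  | PKids.nil, k, v => by simp [kidsSet, kidsFind]
  | PKids.cons k' w rest, k, v => by
    by_cases h : k' = k <;> simp [kidsSet, kidsFind, h, find_set_self rest k v]

lemma find_set_ne : ∀ (ks : PKids) {k k' : String} (v : PTrie), k ≠ k' →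
    kidsFind (kidsSet ks k v) k' = kidsFind ks k'
  | PKids.nil, k, k', v, h => by simp [kidsSet, kidsFind, h]
  | PKids.cons k2 w rest, k, k', v, h => by
    by_cases h2 : k2 = k
    · subst h2; simp [kidsSet, kidsFind, h]
    · simp [kidsSet, kidsFind, h2, find_set_ne rest v h]

lemma kidsLen_set_pos : ∀ (ks : PKids) (k : String) (v : PTrie),
    0 < kidsLen (kidsSet ks k v)
  | PKids.nil, k, v => by simp [kidsSet, kidsLen]
  | PKids.cons k' w rest, k, v => by
    by_cases h : k' = k <;> simp [kidsSet, kidsLen, h]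

lemma endAt_nil (ks : PKids) : endAt (PTrie.node ks) [] = (kidsFind ks "_end").isSome := rfl

lemma endAt_cons_some {ks : PKids} {c : Char} {u : PTrie}
    (h : kidsFind ks (String.ofList [c]) = some u) (cs : List Char) :
    endAt (PTrie.node ks) (c :: cs) = endAt u cs := by
  simp [endAt, walk, h]

lemma endAt_cons_none {ks : PKids} {c : Char}
    (h : kidsFind ks (String.ofList [c]) = none) (cs : List Char) :
    endAt (PTrie.node ks) (c :: cs) = false := by
  simp [endAt, walk, h]

lemma fullAt_nil (ks : PKids) : fullAt (PTrie.node ks) [] = decide (0 < kidsLen ks) := rfl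

lemma fullAt_cons_some {ks : PKids} {c : Char} {u : PTrie}
    (h : kidsFind ks (String.ofList [c]) = some u) (cs : List Char) :
    fullAt (PTrie.node ks) (c :: cs) = fullAt u cs := by
  simp [fullAt, walk, h]

lemma fullAt_cons_none {ks : PKids} {c : Char}
    (h : kidsFind ks (String.ofList [c]) = none) (cs : List Char) :
    fullAt (PTrie.node ks) (c :: cs) = false := by
  simp [fullAt, walk, h]

lemma endAt_emp (cs : List Char) : endAt (PTrie.node PKids.nil) cs = false := by
  cases cs with
  | nil => rw [endAt_nil]; simp [kidsFind]
  | cons c cs' => exact endAt_cons_none (by simp [kidsFind]) cs'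

lemma fullAt_emp (cs : List Char) : fullAt (PTrie.node PKids.nil) cs = false := by
  cases cs with
  | nil => rw [fullAt_nil]; simp [kidsLen]
  | cons c cs' => exact fullAt_cons_none (by simp [kidsFind]) cs'

lemma insertWord_emp (w : List Char) : ∃ t', insertWord (PTrie.node PKids.nil) w = some t' := by
  induction w with
  | nil =>
    exact ⟨PTrie.node (kidsSet PKids.nil "_end" (PTrie.node PKids.nil)),
      by simp [insertWord, kidsLen]⟩
  | cons c rest ih =>
    obtain ⟨t', ht⟩ := ih
    exact ⟨PTrie.node (kidsSet (kidsSet PKids.nil (String.ofList [c]) (PTrie.node PKids.nil))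
        (String.ofList [c]) t'),
      by simp [insertWord, kidsFind, kidsSet, ht]⟩

lemma ins_end {w : List Char} {t t' : PTrie} (h : insertWord t w = some t') :
    ∀ cs, endAt t' cs = (endAt t cs || decide (cs = w)) := by
  induction w generalizing t t' with
  | nil =>
    obtain ⟨kids⟩ := t
    by_cases hlen : 0 < kidsLen kids
    · simp [insertWord, hlen] at h
    · simp only [insertWord, if_neg hlen, Option.some.injEq] at h
      subst h
      intro cs
      cases cs with
      | nil => rw [endAt_nil, endAt_nil, find_set_self]; simp
      | cons c cs' =>
        cases hf : kidsFind kids (String.ofList [c]) with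
        | none =>
          rw [endAt_cons_none (by rw [find_set_ne _ _ (Ne.symm (keyNe c))]; exact hf),
            endAt_cons_none hf]
          simp
        | some u =>
          rw [endAt_cons_some (by rw [find_set_ne _ _ (Ne.symm (keyNe c))]; exact hf),
            endAt_cons_some hf]
          simp
  | cons c rest ih =>
    obtain ⟨kids⟩ := t
    cases hfind : kidsFind kids (String.ofList [c]) with
    | some child =>
      obtain ⟨ckids⟩ := child
      by_cases hend : (kidsFind ckids "_end").isSome
      · simp [insertWord, hfind, hend] at h
      · cases hins : insertWord (PTrie.node ckids) rest with
        | none => simp [insertWord, hfind, hend, hins] at h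
        | some child' =>
          simp [insertWord, hfind, hend, hins] at h
          subst h
          intro cs
          cases cs with
          | nil => rw [endAt_nil, endAt_nil, find_set_ne _ _ (keyNe c)]; simp
          | cons c' cs' =>
            by_cases hc : c' = c
            · subst hc
              rw [endAt_cons_some (find_set_self _ _ _), endAt_cons_some hfind, ih hins]
              simp
            · have hk : String.ofList [c] ≠ String.ofList [c'] := fun hh => hc (keyInj hh).symm
              have hv : kidsFind (kidsSet kids (String.ofList [c]) child') (String.ofList [c'])
                  = kidsFind kids (String.ofList [c']) := find_set_ne _ _ hk
              cases hf2 : kidsFind kids (String.ofList [c']) with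
              | none => rw [endAt_cons_none (hv.trans hf2), endAt_cons_none hf2]; simp [hc]
              | some u => rw [endAt_cons_some (hv.trans hf2), endAt_cons_some hf2]; simp [hc]
    | none =>
      obtain ⟨e, he⟩ := insertWord_emp rest
      simp [insertWord, hfind, find_set_self, kidsFind, he] at h
      subst h
      intro cs
      cases cs with
      | nil =>
        rw [endAt_nil, endAt_nil, find_set_ne _ _ (keyNe c), find_set_ne _ _ (keyNe c)]
        simp
      | cons c' cs' =>
        by_cases hc : c' = c
        · subst hc
          rw [endAt_cons_some (find_set_self _ _ _), ih he, endAt_cons_none hfind, endAt_emp]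
          simp
        · have hk : String.ofList [c] ≠ String.ofList [c'] := fun hh => hc (keyInj hh).symm
          have hv : kidsFind (kidsSet (kidsSet kids (String.ofList [c]) (PTrie.node PKids.nil))
                (String.ofList [c]) e) (String.ofList [c'])
              = kidsFind kids (String.ofList [c']) := by
            rw [find_set_ne _ _ hk, find_set_ne _ _ hk]
          cases hf2 : kidsFind kids (String.ofList [c']) with
          | none => rw [endAt_cons_none (hv.trans hf2), endAt_cons_none hf2]; simp [hc]
          | some u => rw [endAt_cons_some (hv.trans hf2), endAt_cons_some hf2]; simp [hc]

lemma ins_full {w : List Char} {t t' : PTrie} (h : insertWord t w = some t') :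
    ∀ cs, fullAt t' cs = (fullAt t cs || decide (cs <+: w)) := by
  induction w generalizing t t' with
  | nil =>
    obtain ⟨kids⟩ := t
    by_cases hlen : 0 < kidsLen kids
    · simp [insertWord, hlen] at h
    · simp only [insertWord, if_neg hlen, Option.some.injEq] at h
      subst h
      intro cs
      cases cs with
      | nil => rw [fullAt_nil]; simp [kidsLen_set_pos]
      | cons c cs' =>
        cases hf : kidsFind kids (String.ofList [c]) with
        | none =>
          rw [fullAt_cons_none (by rw [find_set_ne _ _ (Ne.symm (keyNe c))]; exact hf),
            fullAt_cons_none hf]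
          simp
        | some u =>
          rw [fullAt_cons_some (by rw [find_set_ne _ _ (Ne.symm (keyNe c))]; exact hf),
            fullAt_cons_some hf]
          simp
  | cons c rest ih =>
    obtain ⟨kids⟩ := t
    cases hfind : kidsFind kids (String.ofList [c]) with
    | some child =>
      obtain ⟨ckids⟩ := child
      by_cases hend : (kidsFind ckids "_end").isSome
      · simp [insertWord, hfind, hend] at h
      · cases hins : insertWord (PTrie.node ckids) rest with
        | none => simp [insertWord, hfind, hend, hins] at h
        | some child' =>
          simp [insertWord, hfind, hend, hins] at h
          subst h
          intro cs
          cases cs with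
          | nil => rw [fullAt_nil]; simp [kidsLen_set_pos]
          | cons c' cs' =>
            by_cases hc : c' = c
            · subst hc
              rw [fullAt_cons_some (find_set_self _ _ _), fullAt_cons_some hfind, ih hins]
              simp [List.cons_prefix_cons]
            · have hk : String.ofList [c] ≠ String.ofList [c'] := fun hh => hc (keyInj hh).symm
              have hv : kidsFind (kidsSet kids (String.ofList [c]) child') (String.ofList [c'])
                  = kidsFind kids (String.ofList [c']) := find_set_ne _ _ hk
              cases hf2 : kidsFind kids (String.ofList [c']) with
              | none =>
                rw [fullAt_cons_none (hv.trans hf2), fullAt_cons_none hf2]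
                simp [List.cons_prefix_cons, hc]
              | some u =>
                rw [fullAt_cons_some (hv.trans hf2), fullAt_cons_some hf2]
                simp [List.cons_prefix_cons, hc]
    | none =>
      obtain ⟨e, he⟩ := insertWord_emp rest
      simp [insertWord, hfind, find_set_self, kidsFind, he] at h
      subst h
      intro cs
      cases cs with
      | nil => rw [fullAt_nil]; simp [kidsLen_set_pos]
      | cons c' cs' =>
        by_cases hc : c' = c
        · subst hc
          rw [fullAt_cons_some (find_set_self _ _ _), ih he, fullAt_cons_none hfind, fullAt_emp]
          simp [List.cons_prefix_cons]
        · have hk : String.ofList [c] ≠ String.ofList [c'] := fun hh => hc (keyInj hh).symm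
          have hv : kidsFind (kidsSet (kidsSet kids (String.ofList [c]) (PTrie.node PKids.nil))
                (String.ofList [c]) e) (String.ofList [c'])
              = kidsFind kids (String.ofList [c']) := by
            rw [find_set_ne _ _ hk, find_set_ne _ _ hk]
          cases hf2 : kidsFind kids (String.ofList [c']) with
          | none =>
            rw [fullAt_cons_none (hv.trans hf2), fullAt_cons_none hf2]
            simp [List.cons_prefix_cons, hc]
          | some u =>
            rw [fullAt_cons_some (hv.trans hf2), fullAt_cons_some hf2]
            simp [List.cons_prefix_cons, hc]

lemma ins_none {w : List Char} {t : PTrie} :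
    insertWord t w = none ↔
      (∃ i, 1 ≤ i ∧ i ≤ w.length ∧ endAt t (w.take i) = true) ∨ fullAt t w = true := by
  induction w generalizing t with
  | nil =>
    obtain ⟨kids⟩ := t
    by_cases hlen : 0 < kidsLen kids
    · simp only [insertWord, if_pos hlen, fullAt_nil]
      simp [hlen]
    · simp only [insertWord, if_neg hlen, fullAt_nil]
      simp only [List.length_nil, reduceCtorEq, false_iff, not_or, not_exists]
      constructor
      · intro i ⟨h1, h2, _⟩; omega
      · simp [hlen]
  | cons c rest ih =>
    obtain ⟨kids⟩ := t
    cases hfind : kidsFind kids (String.ofList [c]) with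
    | some child =>
      obtain ⟨ckids⟩ := child
      by_cases hend : (kidsFind ckids "_end").isSome
      · have hL : insertWord (PTrie.node kids) (c :: rest) = none := by
          simp [insertWord, hfind, hend]
        rw [hL]
        refine iff_of_true rfl (Or.inl ⟨1, le_refl 1, by simp, ?_⟩)
        rw [show (c :: rest).take 1 = c :: ([] : List Char) from rfl,
          endAt_cons_some hfind, endAt_nil]
        exact hend
      · cases hins : insertWord (PTrie.node ckids) rest with
        | none =>
          have hL : insertWord (PTrie.node kids) (c :: rest) = none := by
            simp [insertWord, hfind, hend, hins]
          rw [hL]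
          apply iff_of_true rfl
          rcases ih.mp hins with ⟨i, h1, h2, h3⟩ | hfull
          · refine Or.inl ⟨i + 1, by omega, by simp; omega, ?_⟩
            rw [show (c :: rest).take (i + 1) = c :: rest.take i from rfl,
              endAt_cons_some hfind]
            exact h3
          · exact Or.inr (by rw [fullAt_cons_some hfind]; exact hfull)
        | some child' =>
          have hL : insertWord (PTrie.node kids) (c :: rest)
              = some (PTrie.node (kidsSet kids (String.ofList [c]) child')) := by
            simp [insertWord, hfind, hend, hins]
          rw [hL]
          apply iff_of_false (by simp)
          rintro (⟨i, h1, h2, h3⟩ | hfull)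
          · obtain ⟨j, rfl⟩ : ∃ j, i = j + 1 := ⟨i - 1, by omega⟩
            rw [show (c :: rest).take (j + 1) = c :: rest.take j from rfl,
              endAt_cons_some hfind] at h3
            cases j with
            | zero =>
              rw [List.take_zero, endAt_nil] at h3
              exact hend h3
            | succ j' =>
              have hcon := ih.mpr (Or.inl ⟨j' + 1, by omega, by simp at h2; omega, h3⟩)
              rw [hins] at hcon
              simp at hcon
          · rw [fullAt_cons_some hfind] at hfull
            have hcon := ih.mpr (Or.inr hfull)
            rw [hins] at hcon
            simp at hcon
    | none =>
      obtain ⟨e, he⟩ := insertWord_emp rest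
      have hL : insertWord (PTrie.node kids) (c :: rest) ≠ none := by
        simp [insertWord, hfind, find_set_self, kidsFind, he]
      apply iff_of_false hL
      rintro (⟨i, h1, h2, h3⟩ | hfull)
      · obtain ⟨j, rfl⟩ : ∃ j, i = j + 1 := ⟨i - 1, by omega⟩
        rw [show (c :: rest).take (j + 1) = c :: rest.take j from rfl,
          endAt_cons_none hfind] at h3
        simp at h3
      · rw [fullAt_cons_none hfind] at hfull
        simp at hfull

-- the common bad-word condition, over the list of previously accepted words
def badSpec (seen : List String) (c : String) : Prop :=
  (∃ w ∈ seen, w.toList ≠ [] ∧ w.toList <+: c.toList) ∨ ∃ w ∈ seen, c.toList <+: w.toList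

def seenEnd (seen : List String) (t : PTrie) : Prop :=
  ∀ cs, endAt t cs = true ↔ ∃ w ∈ seen, w.toList = cs

def seenFull (seen : List String) (t : PTrie) : Prop :=
  ∀ cs, fullAt t cs = true ↔ ∃ w ∈ seen, cs <+: w.toList

lemma insertWord_none_iff {seen : List String} {t : PTrie} {c : String}
    (hE : seenEnd seen t) (hF : seenFull seen t) :
    insertWord t c.toList = none ↔ badSpec seen c := by
  rw [ins_none]
  constructor
  · rintro (⟨i, h1, h2, h3⟩ | hfull)
    · obtain ⟨w, hw, hwt⟩ := (hE _).mp h3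
      left
      refine ⟨w, hw, ?_, ?_⟩
      · intro hnil
        rw [hwt, List.take_eq_nil_iff] at hnil
        rcases hnil with h0 | h0
        · omega
        · rw [h0] at h2; simp at h2; omega
      · rw [hwt]; exact List.take_prefix _ _
    · obtain ⟨w, hw, hpre⟩ := (hF _).mp hfull
      exact Or.inr ⟨w, hw, hpre⟩
  · rintro (⟨w, hw, hne, hpre⟩ | ⟨w, hw, hpre⟩)
    · left
      refine ⟨w.toList.length, ?_, hpre.length_le, ?_⟩
      · have := List.length_pos_iff.mpr hne; omega
      · refine (hE _).mpr ⟨w, hw, ?_⟩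
        exact (List.prefix_iff_eq_take.mp hpre)
    · exact Or.inr ((hF _).mpr ⟨w, hw, hpre⟩)

lemma badWord_iff (seen : PySem.Set String) (c : String) :
    badWord seen c = true ↔ badSpec seen c := by
  unfold badWord badSpec
  simp only [Bool.or_eq_true, List.any_eq_true]
  constructor
  · rintro (⟨i, hi, hc⟩ | ⟨w, hw, hs⟩)
    · rw [PySem.List.mem_pyRange_one, PySem.Str.len_eq] at hi
      obtain ⟨hi1, hi2⟩ := hi
      rw [PySem.Set.contains_iff] at hc
      left
      refine ⟨_, hc, ?_, ?_⟩
      · rw [PySem.Str.toList_slice, PySem.Chars.slice_eq_listSlice,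
          PySem.List.slice_to c.toList (show (0:ℤ) ≤ i by omega)]
        intro hnil
        rw [List.take_eq_nil_iff] at hnil
        rcases hnil with h0 | h0
        · omega
        · rw [h0] at hi2; simp at hi2; omega
      · rw [PySem.Str.toList_slice, PySem.Chars.slice_eq_listSlice,
          PySem.List.slice_to c.toList (show (0:ℤ) ≤ i by omega)]
        exact List.take_prefix _ _
    · right
      rw [PySem.Str.startswith_eq, PySem.Chars.startswith_iff] at hs
      exact ⟨w, hw, hs⟩
  · rintro (⟨w, hw, hne, hpre⟩ | ⟨w, hw, hpre⟩)
    · left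
      refine ⟨(w.toList.length : ℤ), ?_, ?_⟩
      · rw [PySem.List.mem_pyRange_one, PySem.Str.len_eq]
        have hlen := hpre.length_le
        have hpos : 0 < w.toList.length := List.length_pos_iff.mpr hne
        omega
      · rw [PySem.Set.contains_iff]
        have hsl : PySem.Str.slice c none (some (w.toList.length : ℤ)) = w := by
          apply String.toList_inj.mp
          rw [PySem.Str.toList_slice, PySem.Chars.slice_eq_listSlice,
            PySem.List.slice_to c.toList (Int.natCast_nonneg _)]
          simp only [Int.toNat_natCast]
          exact (List.prefix_iff_eq_take.mp hpre).symm
        rw [hsl]; exact hw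
    · right
      refine ⟨w, hw, ?_⟩
      rw [PySem.Str.startswith_eq, PySem.Chars.startswith_iff]
      exact hpre

lemma seenEnd_insert {seen : List String} {t t' : PTrie} {c : String}
    (h : insertWord t c.toList = some t') (hE : seenEnd seen t) :
    seenEnd (seen ++ [c]) t' := by
  intro cs
  rw [ins_end h]
  simp only [Bool.or_eq_true, decide_eq_true_eq, hE cs]
  constructor
  · rintro (⟨w, hw, hwt⟩ | rfl)
    · exact ⟨w, by simp [hw], hwt⟩
    · exact ⟨c, by simp, rfl⟩
  · rintro ⟨w, hw, hwt⟩
    simp only [List.mem_append, List.mem_singleton] at hw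
    rcases hw with hw | rfl
    · exact Or.inl ⟨w, hw, hwt⟩
    · exact Or.inr hwt.symm

lemma seenFull_insert {seen : List String} {t t' : PTrie} {c : String}
    (h : insertWord t c.toList = some t') (hF : seenFull seen t) :
    seenFull (seen ++ [c]) t' := by
  intro cs
  rw [ins_full h]
  simp only [Bool.or_eq_true, decide_eq_true_eq, hF cs]
  constructor
  · rintro (⟨w, hw, hwt⟩ | hpre)
    · exact ⟨w, by simp [hw], hwt⟩
    · exact ⟨c, by simp, hpre⟩
  · rintro ⟨w, hw, hwt⟩
    simp only [List.mem_append, List.mem_singleton] at hw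
    rcases hw with hw | rfl
    · exact Or.inl ⟨w, hw, hwt⟩
    · exact Or.inr hwt

lemma loop_eq : ∀ (ws : List String) (t : PTrie) (seen : PySem.Set String),
    seenEnd seen t → seenFull seen t → aLoop t ws = bLoop seen ws := by
  intro ws
  induction ws with
  | nil => intro t seen _ _; rfl
  | cons c rest ih =>
    intro t seen hE hF
    by_cases hb : badWord seen c = true
    · have hnone : insertWord t c.toList = none :=
        (insertWord_none_iff hE hF).mpr ((badWord_iff seen c).mp hb)
      simp [aLoop, bLoop, hnone, hb]
    · have hspec : ¬ badSpec seen c := fun hs => hb ((badWord_iff seen c).mpr hs)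
      have hsome : insertWord t c.toList ≠ none := fun hn =>
        hspec ((insertWord_none_iff hE hF).mp hn)
      obtain ⟨t', ht'⟩ := Option.ne_none_iff_exists'.mp hsome
      have hcnot : c ∉ seen := fun hc =>
        hspec (Or.inr ⟨c, hc, List.prefix_refl _⟩)
      simp only [aLoop, bLoop, ht', if_neg hb]
      rw [PySem.Set.add_of_not_mem hcnot]
      exact ih t' (seen ++ [c]) (seenEnd_insert ht' hE) (seenFull_insert ht' hF)

-- ===== VERDICT (by name: the statement is the Claim_ definition above) =====
theorem check_good_set_spec : Claim_equal_check_good_set := by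
  intro words _
  unfold Spec_check_good_set check_good_set check_good_set_alt
  apply loop_eq
  · intro cs
    rw [show PTrie.node PKids.nil = (PTrie.node PKids.nil) from rfl, endAt_emp]
    simp [PySem.Set.empty]
  · intro cs
    rw [show PTrie.node PKids.nil = (PTrie.node PKids.nil) from rfl, fullAt_emp]
    simp [PySem.Set.empty]
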